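-- pv_equiv track=rewrite | github.com/zetta102/ejFundInf | tp6.py | ejercicio10
-- ===== SOURCE A (Python) =====
-- def ejercicio10(a: int, b):
--     # En las funciones, las entradas teóricamente serían los argumentos
--
--     # Proceso
--     c = 0
--     while a > 0:
--         if a % 10 == b:
--             return c
--         a = a // 10
--         c = c + 1
--     return -1
-- ===== SOURCE B (Python) =====
-- def ejercicio10(a: int, b):
--     # Delegate the digit search to str.find: search the reversed decimal
--     # string of a for the one-character string of b. Only a strictly
--     # positive a has digits here (matching the while a > 0 loop), and only
--     # a single-digit b can ever match a digit.
--     if a <= 0 or not (0 <= b <= 9):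
--         return -1
--     return str(a)[::-1].find(str(b))
-- ===== Notes on version B (the rewrite author's own statement) =====
-- stated objective: idiomatic
-- what changed: Replaces the arithmetic mod/div extraction loop with a loop-free formulation: guard that b is a single digit, then return str(a)[::-1].find(str(b)), delegating the first-match search to the library substring find.
import Mathlib
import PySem

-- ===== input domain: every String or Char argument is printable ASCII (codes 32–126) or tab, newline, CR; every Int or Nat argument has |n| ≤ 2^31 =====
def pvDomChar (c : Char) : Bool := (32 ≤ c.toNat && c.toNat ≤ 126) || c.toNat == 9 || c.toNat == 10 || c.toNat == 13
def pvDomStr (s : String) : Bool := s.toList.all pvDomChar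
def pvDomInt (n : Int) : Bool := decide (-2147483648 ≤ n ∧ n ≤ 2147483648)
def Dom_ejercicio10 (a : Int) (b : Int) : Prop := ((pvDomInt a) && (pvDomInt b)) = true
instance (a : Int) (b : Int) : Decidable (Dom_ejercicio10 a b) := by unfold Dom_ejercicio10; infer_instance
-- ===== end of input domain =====

-- B replaces A's arithmetic mod/div digit-extraction loop with a loop-free library
-- substring search on the reversed decimal string of a (idiomatic; same asymptotic cost).


-- ===== PORT A =====
-- while a > 0: if a % 10 == b: return c; a = a // 10; c = c + 1; return -1
def ejercicio10Go (a b c : Int) : Int :=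
  if 0 < a then
    if PySem.Int.mod a 10 = b then c
    else ejercicio10Go (PySem.Int.floordiv a 10) b (c + 1)
  else -1
termination_by a.toNat
decreasing_by
  rw [PySem.Int.floordiv_eq_ediv_of_pos (by norm_num)]
  omega

def ejercicio10 (a : Int) (b : Int) : Int := ejercicio10Go a b 0

-- ===== PORT B =====
-- if a <= 0 or not (0 <= b <= 9): return -1
-- return str(a)[::-1].find(str(b))      -- [::-1] = reversal of the char list
def ejercicio10_alt (a : Int) (b : Int) : Int :=
  if a ≤ 0 ∨ ¬ (0 ≤ b ∧ b ≤ 9) then -1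
  else PySem.Chars.find (PySem.Int.toChars a).reverse (PySem.Int.toChars b)

-- ===== PRECONDITION & SPEC =====
def Spec_ejercicio10 (a : Int) (b : Int) (out : Int) : Prop := out = ejercicio10_alt a b
instance (a : Int) (b : Int) (out : Int) : Decidable (Spec_ejercicio10 a b out) := by unfold Spec_ejercicio10; infer_instance

-- ===== CLAIM =====
def Claim_equal_ejercicio10 : Prop := ∀ (a : Int) (b : Int), Dom_ejercicio10 a b → Spec_ejercicio10 a b (ejercicio10 a b)

-- ===== LEMMAS AND PROOFS =====

-- proof-only reference scan: first index of char c in s, -1 if absent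
def digitIdx (s : List Char) (c : Char) : Int :=
  match s with
  | [] => -1
  | x :: r => if x = c then 0 else (if digitIdx r c = -1 then -1 else digitIdx r c + 1)

lemma singleton_prefix_iff (c : Char) (t : List Char) :
    [c] <+: t ↔ ∃ u, t = c :: u := by
  constructor
  · rintro ⟨u, rfl⟩; exact ⟨u, rfl⟩
  · rintro ⟨u, rfl⟩; exact ⟨u, rfl⟩

lemma singleton_infix_iff (c : Char) (s : List Char) :
    [c] <:+: s ↔ c ∈ s := by
  constructor
  · intro h; exact (List.singleton_sublist).1 h.sublist
  · intro h
    obtain ⟨u, v, rfl⟩ := List.append_of_mem h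
    exact ⟨u, v, by simp⟩

lemma digitIdx_cases (s : List Char) (c : Char) :
    digitIdx s c = -1 ∨ 0 ≤ digitIdx s c := by
  induction s with
  | nil => left; rfl
  | cons x r ih =>
    by_cases hx : x = c
    · right; simp [digitIdx, hx]
    · by_cases hr : digitIdx r c = -1
      · left; simp [digitIdx, hx, hr]
      · right
        have h0 : 0 ≤ digitIdx r c := by rcases ih with h | h; exact absurd h hr; exact h
        simp only [digitIdx, hx, if_false, if_neg hr]
        omega

lemma digitIdx_nonneg_iff (s : List Char) (c : Char) :
    digitIdx s c ≠ -1 ↔ c ∈ s := by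
  induction s with
  | nil => simp [digitIdx]
  | cons x r ih =>
    by_cases hx : x = c
    · simp [digitIdx, hx]
    · by_cases hr : digitIdx r c = -1
      · have hm : ¬ c ∈ r := fun h => (ih.2 h) hr
        simp [digitIdx, hx, hr, Ne.symm hx, hm]
      · have h0 : 0 ≤ digitIdx r c := by
          rcases digitIdx_cases r c with h | h; exact absurd h hr; exact h
        have hne : ¬ digitIdx r c + 1 = -1 := by omega
        simp [digitIdx, hx, hr, hne, ih.1 hr]

lemma find_eq_digitIdx (s : List Char) (c : Char) :
    PySem.Chars.find s [c] = digitIdx s c := by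
  induction s with
  | nil =>
    have : ¬ ([c] <:+: ([] : List Char)) := by
      rw [singleton_infix_iff]; simp
    rw [(PySem.Chars.find_eq_neg_one_iff _ _).2 this]; rfl
  | cons x r ih =>
    by_cases hx : x = c
    · -- first occurrence at 0
      rw [hx]
      have hmem : c ∈ c :: r := by simp
      have hinf : [c] <:+: (c :: r) := (singleton_infix_iff _ _).2 hmem
      have hge : 0 ≤ PySem.Chars.find (c :: r) [c] :=
        (PySem.Chars.find_nonneg_iff _ _).2 hinf
      have hspec := PySem.Chars.find_spec hge
      have hz : (PySem.Chars.find (c :: r) [c]).toNat = 0 := by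
        by_contra hnz
        have := hspec.2 0 (by omega)
        exact this ((singleton_prefix_iff _ _).2 ⟨r, by simp⟩)
      have hfz : PySem.Chars.find (c :: r) [c] = 0 := by omega
      rw [hfz]; simp [digitIdx]
    · by_cases hmem : c ∈ r
      · -- both sides = (index in r) + 1
        have hinfr : [c] <:+: r := (singleton_infix_iff _ _).2 hmem
        have hger : 0 ≤ PySem.Chars.find r [c] :=
          (PySem.Chars.find_nonneg_iff _ _).2 hinfr
        have hspecr := PySem.Chars.find_spec hger
        set j := (PySem.Chars.find r [c]).toNat with hj
        have hinf : [c] <:+: (x :: r) :=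
          (singleton_infix_iff _ _).2 (List.mem_cons.2 (Or.inr hmem))
        have hge : 0 ≤ PySem.Chars.find (x :: r) [c] :=
          (PySem.Chars.find_nonneg_iff _ _).2 hinf
        have hspec := PySem.Chars.find_spec hge
        set m := (PySem.Chars.find (x :: r) [c]).toNat with hm
        -- no occurrence in x :: r before j + 1
        have hnotbefore : ∀ i < j + 1, ¬ ([c] <+: (x :: r).drop i) := by
          intro i hi
          cases i with
          | zero =>
            intro hp
            obtain ⟨u, hu⟩ := (singleton_prefix_iff _ _).1 hp
            simp only [List.drop_zero, List.cons.injEq] at hu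
            exact hx hu.1
          | succ i' =>
            simp only [List.drop_succ_cons]
            exact hspecr.2 i' (by omega)
        have hmj : m = j + 1 := by
          rcases lt_trichotomy m (j + 1) with h | h | h
          · exact absurd hspec.1 (hnotbefore m h)
          · exact h
          · have := hspec.2 (j + 1) h
            simp only [List.drop_succ_cons] at this
            exact absurd hspecr.1 this
        have hr_ne : digitIdx r c ≠ -1 := (digitIdx_nonneg_iff r c).2 hmem
        have : PySem.Chars.find (x :: r) [c] = PySem.Chars.find r [c] + 1 := by omega
        simp [this, ih, digitIdx, hx, hr_ne]
      · -- absent on both sides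
        have hnot : ¬ ([c] <:+: (x :: r)) := by
          rw [singleton_infix_iff]; simp [Ne.symm hx, hmem]
        rw [(PySem.Chars.find_eq_neg_one_iff _ _).2 hnot]
        have hr : digitIdx r c = -1 := by
          by_contra h; exact hmem ((digitIdx_nonneg_iff r c).1 h)
        simp [digitIdx, hx, hr]

-- Nat.toDigits plumbing (reversed digit structure of the decimal string)
lemma tdc_append (f n : Nat) (acc : List Char) :
    Nat.toDigitsCore 10 f n acc = Nat.toDigitsCore 10 f n [] ++ acc := by
  induction f generalizing n acc with
  | zero => simp [Nat.toDigitsCore]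
  | succ f ih =>
    simp only [Nat.toDigitsCore]
    split_ifs with h
    · simp
    · rw [ih (n / 10) (Nat.digitChar (n % 10) :: acc),
        ih (n / 10) [Nat.digitChar (n % 10)]]
      simp

lemma tdc_fuel (n : Nat) : ∀ f, n < f → Nat.toDigitsCore 10 f n [] = Nat.toDigits 10 n := by
  induction n using Nat.strong_induction_on with
  | _ n ih =>
    intro f hf
    match f, hf with
    | f + 1, hf =>
      show Nat.toDigitsCore 10 (f + 1) n [] = Nat.toDigitsCore 10 (n + 1) n []
      by_cases h : n / 10 = 0
      · simp [Nat.toDigitsCore, h]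
      · have hlt : n / 10 < n := by omega
        simp only [Nat.toDigitsCore, h, if_false]
        rw [tdc_append f, tdc_append n]
        rw [ih (n / 10) hlt f (by omega), ih (n / 10) hlt n (by omega)]

lemma toDigits_rev (n : Nat) :
    (Nat.toDigits 10 n).reverse =
      Nat.digitChar (n % 10) ::
        (if n / 10 = 0 then [] else (Nat.toDigits 10 (n / 10)).reverse) := by
  show (Nat.toDigitsCore 10 (n + 1) n []).reverse = _
  by_cases h : n / 10 = 0
  · simp [Nat.toDigitsCore, h]
  · simp only [Nat.toDigitsCore, h, if_false]
    rw [tdc_append n, tdc_fuel (n / 10) n (by omega)]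
    simp

lemma digitChar_inj (d e : Nat) (hd : d < 10) (he : e < 10) :
    Nat.digitChar d = Nat.digitChar e ↔ d = e := by
  interval_cases d <;> interval_cases e <;> simp <;> decide

-- Go's result with accumulator c is -1 or at least c
lemma go_ge (n : Nat) : ∀ (b c : Int),
    ejercicio10Go (n : Int) b c = -1 ∨ c ≤ ejercicio10Go (n : Int) b c := by
  induction n using Nat.strong_induction_on with
  | _ n ih =>
    intro b c
    by_cases hn : 0 < (n : Int)
    · rw [ejercicio10Go, if_pos hn]
      by_cases hmb : PySem.Int.mod (n : Int) 10 = b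
      · right; rw [if_pos hmb]
      · rw [if_neg hmb]
        have hdm : PySem.Int.floordiv (n : Int) 10 = ((n / 10 : Nat) : Int) := by
          exact_mod_cast PySem.Int.floordiv_natCast n 10
        rw [hdm]
        have hlt : n / 10 < n := Nat.div_lt_self (by exact_mod_cast hn) (by norm_num)
        rcases ih (n / 10) hlt b (c + 1) with h | h
        · left; exact h
        · right; omega
    · left; rw [ejercicio10Go, if_neg hn]

-- shifting the accumulator
lemma go_shift (m : Nat) : ∀ (b c : Int),
    ejercicio10Go (m : Int) b c =
      (if ejercicio10Go (m : Int) b 0 = -1 then -1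
       else ejercicio10Go (m : Int) b 0 + c) := by
  induction m using Nat.strong_induction_on with
  | _ m ihm =>
    intro b c
    by_cases hm : 0 < (m : Int)
    · by_cases hmb : PySem.Int.mod (m : Int) 10 = b
      · have hg0 : ejercicio10Go (m : Int) b 0 = 0 := by
          rw [ejercicio10Go, if_pos hm, if_pos hmb]
        have hgc : ejercicio10Go (m : Int) b c = c := by
          rw [ejercicio10Go, if_pos hm, if_pos hmb]
        rw [hgc, hg0]; norm_num
      · have hdm : PySem.Int.floordiv (m : Int) 10 = ((m / 10 : Nat) : Int) := by
          exact_mod_cast PySem.Int.floordiv_natCast m 10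
        have hm10 : m / 10 < m := Nat.div_lt_self (by exact_mod_cast hm) (by norm_num)
        have hgc : ejercicio10Go (m : Int) b c = ejercicio10Go ((m / 10 : Nat) : Int) b (c + 1) := by
          rw [ejercicio10Go, if_pos hm, if_neg hmb, hdm]
        have hg0 : ejercicio10Go (m : Int) b 0 = ejercicio10Go ((m / 10 : Nat) : Int) b (0 + 1) := by
          rw [ejercicio10Go, if_pos hm, if_neg hmb, hdm]
        rcases go_ge (m / 10) b 0 with h | h
        · have e1 : ejercicio10Go ((m / 10 : Nat) : Int) b (c + 1) = -1 := by
            rw [ihm (m / 10) hm10 b (c + 1), if_pos h]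
          have e2 : ejercicio10Go ((m / 10 : Nat) : Int) b (0 + 1) = -1 := by
            rw [ihm (m / 10) hm10 b (0 + 1), if_pos h]
          rw [hgc, hg0, e1, e2]; norm_num
        · have hne : ejercicio10Go ((m / 10 : Nat) : Int) b 0 ≠ -1 := by omega
          have e1 : ejercicio10Go ((m / 10 : Nat) : Int) b (c + 1) =
              ejercicio10Go ((m / 10 : Nat) : Int) b 0 + (c + 1) := by
            rw [ihm (m / 10) hm10 b (c + 1), if_neg hne]
          have e2 : ejercicio10Go ((m / 10 : Nat) : Int) b (0 + 1) =
              ejercicio10Go ((m / 10 : Nat) : Int) b 0 + (0 + 1) := by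
            rw [ihm (m / 10) hm10 b (0 + 1), if_neg hne]
          rw [hgc, hg0, e1, e2]
          have hne2 : ejercicio10Go ((m / 10 : Nat) : Int) b 0 + (0 + 1) ≠ -1 := by omega
          rw [if_neg hne2]; omega
    · have hall : ∀ c' : Int, ejercicio10Go (m : Int) b c' = -1 := fun c' => by
        rw [ejercicio10Go, if_neg hm]
      rw [hall c, hall 0]; norm_num

-- A's loop never matches when b is not a single digit
lemma go_out_of_range (n : Nat) : ∀ (b c : Int), ¬ (0 ≤ b ∧ b ≤ 9) →
    ejercicio10Go (n : Int) b c = -1 := by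
  induction n using Nat.strong_induction_on with
  | _ n ih =>
    intro b c hb
    rw [ejercicio10Go]
    by_cases hn : 0 < (n : Int)
    · rw [if_pos hn]
      have hmod : PySem.Int.mod (n : Int) 10 = ((n % 10 : Nat) : Int) := by
        exact_mod_cast PySem.Int.mod_natCast n 10
      have hne : ¬ PySem.Int.mod (n : Int) 10 = b := by
        rw [hmod]; intro h; exact hb ⟨by omega, by omega⟩
      rw [if_neg hne]
      have hdiv : PySem.Int.floordiv (n : Int) 10 = ((n / 10 : Nat) : Int) := by
        exact_mod_cast PySem.Int.floordiv_natCast n 10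
      rw [hdiv]
      exact ih (n / 10) (by omega) b (c + 1) hb
    · rw [if_neg hn]

-- A's loop for a = n > 0 is the right-to-left scan of the decimal digits
lemma go_eq_digitIdx (n : Nat) : ∀ (b : Int), 0 < n → 0 ≤ b → b ≤ 9 →
    ejercicio10Go (n : Int) b 0 =
      digitIdx ((Nat.toDigits 10 n).reverse) (Nat.digitChar b.toNat) := by
  induction n using Nat.strong_induction_on with
  | _ n ih =>
    intro b hn hb0 hb9
    rw [toDigits_rev n]
    rw [ejercicio10Go, if_pos (by exact_mod_cast hn)]
    have hmod : PySem.Int.mod (n : Int) 10 = ((n % 10 : Nat) : Int) := by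
      exact_mod_cast PySem.Int.mod_natCast n 10
    have hdiv : PySem.Int.floordiv (n : Int) 10 = ((n / 10 : Nat) : Int) := by
      exact_mod_cast PySem.Int.floordiv_natCast n 10
    by_cases hbm : ((n % 10 : Nat) : Int) = b
    · have hc : Nat.digitChar (n % 10) = Nat.digitChar b.toNat := by
        congr 1; omega
      rw [hmod, if_pos hbm]
      simp [digitIdx, hc]
    · have hc : ¬ Nat.digitChar (n % 10) = Nat.digitChar b.toNat := by
        rw [digitChar_inj (n % 10) b.toNat (by omega) (by omega)]
        omega
      rw [hmod, if_neg hbm, hdiv]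
      by_cases h10 : n / 10 = 0
      · have hz : ejercicio10Go (0 : Int) b 1 = -1 := by
          rw [ejercicio10Go]; norm_num
        simp [h10, digitIdx, hc, hz]
      · have hrec := ih (n / 10) (by omega) b (by omega) hb0 hb9
        simp only [h10, if_false, digitIdx, hc, if_false]
        rw [go_shift (n / 10) b (0 + 1), hrec]
        split_ifs <;> omega

-- ===== VERDICT =====
theorem ejercicio10_spec : Claim_equal_ejercicio10 := by
  intro a b _
  unfold Spec_ejercicio10 ejercicio10 ejercicio10_alt
  by_cases ha : a ≤ 0
  · rw [if_pos (Or.inl ha), ejercicio10Go, if_neg (by omega)]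
  · by_cases hb : 0 ≤ b ∧ b ≤ 9
    · rw [if_neg (by tauto)]
      have h1 : (a.toNat : Int) = a := Int.toNat_of_nonneg (by omega)
      have h2 : PySem.Int.toChars a = Nat.toDigits 10 a.toNat := by
        simp [PySem.Int.toChars, show ¬ a < 0 by omega]
      have h3 : PySem.Int.toChars b = [Nat.digitChar b.toNat] := by
        obtain ⟨hb0, hb9⟩ := hb
        interval_cases b <;> decide
      rw [h2, h3, find_eq_digitIdx, ← h1]
      exact go_eq_digitIdx a.toNat b (by omega) hb.1 hb.2
    · rw [if_pos (Or.inr hb), ← Int.toNat_of_nonneg (show (0:Int) ≤ a by omega)]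
      exact go_out_of_range a.toNat b 0 hb
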